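-- pv_equiv track=rewrite | github.com/mzat-dev/bimdiff | src/bimdiff/filters.py | is_noisy_change
-- ===== SOURCE A (Python) =====
-- _NOISE_FIELDS: frozenset[str] = frozenset({
--     # IfcRepresentation Plan vs Body export: the model is the same, the
--     # exporter just chose to emit a 2D symbol on one side and a 3D body on
--     # the other. Visually identical in any 3D viewer.
--     "geometry.presence",
-- })
--
-- _NOISE_FIELD_PREFIXES: tuple[str, ...] = (
--     # ArchiCAD stamps the renovation phase on every element on every save.
--     "properties.AC_Pset_RenovationAndPhasing.",
--     # IfcElementQuantity entries that the exporter emits without a pset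
--     # name end up under "None" — these are auto-derived geometry quantities
--     # (NetVolume, NetFootprintArea, ...) that flicker between exports.
--     "properties.None.",
-- )
--
-- def is_noisy_change(field: str) -> bool:
--     """Return True if ``field`` matches a known export-noise pattern.
--
--     Patterns covered:
--
--     - exact ``geometry.presence`` (Plan ↔ Body export flips)
--     - ``properties.AC_Pset_RenovationAndPhasing.*`` (ArchiCAD phase stamp)
--     - ``properties.None.*`` (un-named auto-derived quantities)
--     - any ``properties.<pset>.*`` whose ``<pset>`` segment contains
--       non-printable or non-ASCII bytes (typically corrupted UTF-8 from
--       exporters that emit project-internal label names)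
--     """
--     if field in _NOISE_FIELDS:
--         return True
--     if any(field.startswith(p) for p in _NOISE_FIELD_PREFIXES):
--         return True
--     parts = field.split(".")
--     if len(parts) >= 2 and parts[0] == "properties":
--         pset = parts[1]
--         if any(ord(c) > 126 or ord(c) < 32 for c in pset):
--             return True
--     return False
-- ===== SOURCE B (Python) =====
-- def is_noisy_change(field: str) -> bool:
--     # Tokenize once and dispatch on the dot-separated segments instead of scanning prefixes.
--     if field == "geometry.presence":
--         return True
--     parts = field.split(".")
--     if len(parts) >= 2 and parts[0] == "properties":
--         pset = parts[1]
--         # prefix patterns carry a trailing dot, hence a third segment is required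
--         if len(parts) >= 3 and pset in ("AC_Pset_RenovationAndPhasing", "None"):
--             return True
--         return any(not (32 <= ord(c) <= 126) for c in pset)
--     return False
-- ===== Notes on version B (the rewrite author's own statement) =====
-- stated objective: simpler
-- what changed: Replaces the frozenset membership plus per-prefix startswith scan with a single dot-tokenization: split once, then dispatch on the segments (the trailing-dot prefixes become 'at least three segments with a named second segment'), merging the named-pset and corrupted-pset checks into one branch on parts[1].
import Mathlib
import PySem

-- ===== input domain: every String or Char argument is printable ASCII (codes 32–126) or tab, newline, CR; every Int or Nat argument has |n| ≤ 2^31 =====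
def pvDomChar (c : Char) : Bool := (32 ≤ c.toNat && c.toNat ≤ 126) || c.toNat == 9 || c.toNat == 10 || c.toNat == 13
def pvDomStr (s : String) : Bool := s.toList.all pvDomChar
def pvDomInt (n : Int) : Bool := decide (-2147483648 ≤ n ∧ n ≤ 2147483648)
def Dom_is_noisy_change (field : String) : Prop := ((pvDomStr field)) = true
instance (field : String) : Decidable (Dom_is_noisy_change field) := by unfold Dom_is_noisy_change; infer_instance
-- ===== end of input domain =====

-- B replaces A's exact-set membership plus per-prefix startswith scan with a single dot-tokenization
-- and dispatch on the segments (objective: simpler); return values proved equal on all inputs.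


-- ===== PORT A =====
-- strings are carried as lists of code points (PySem.Chars); field.split(".") is PySem.Chars.splitOn
def noiseFieldPrefixes : List (List Char) :=
  ["properties.AC_Pset_RenovationAndPhasing.".toList, "properties.None.".toList]

def is_noisy_change (field : String) : Bool :=
  if field = "geometry.presence" then true
  else if noiseFieldPrefixes.any (fun p => PySem.Chars.startswith field.toList p) then true
  else
    let parts := PySem.Chars.splitOn field.toList ['.']
    if 2 ≤ parts.length ∧ PySem.List.pyGetD parts 0 [] = "properties".toList then
      let pset := PySem.List.pyGetD parts 1 []
      if pset.any (fun c => decide (126 < c.toNat) || decide (c.toNat < 32)) then true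
      else false
    else false

-- ===== PORT B =====
def is_noisy_change_alt (field : String) : Bool :=
  if field = "geometry.presence" then true
  else
    match PySem.Chars.splitOn field.toList ['.'] with
    | p0 :: pset :: rest =>
      if p0 = "properties".toList then
        if rest ≠ [] ∧ (pset = "AC_Pset_RenovationAndPhasing".toList ∨ pset = "None".toList) then
          true
        else pset.any (fun c => !(decide (32 ≤ c.toNat) && decide (c.toNat ≤ 126)))
      else false
    | _ => false


-- ===== PRECONDITION & SPEC =====
def Spec_is_noisy_change (field : String) (out : Bool) : Prop := out = is_noisy_change_alt field
instance (field : String) (out : Bool) : Decidable (Spec_is_noisy_change field out) := by unfold Spec_is_noisy_change; infer_instance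

-- ===== CLAIM (what is proved, stated in full; the proofs are below) =====
def Claim_equal_is_noisy_change : Prop := ∀ (field : String), Dom_is_noisy_change field → Spec_is_noisy_change field (is_noisy_change field)

-- ===== LEMMAS AND PROOFS =====

-- proof-side structural model of PySem.Chars.splitOn · ['.']
def sd : List Char → List (List Char)
  | [] => [[]]
  | c :: rest =>
    if c = '.' then [] :: sd rest
    else
      match sd rest with
      | [] => [[c]]
      | a :: r => (c :: a) :: r

lemma sd_ne_nil (l : List Char) : sd l ≠ [] := by
  cases l with
  | nil => simp [sd]
  | cons c rest => simp only [sd]; split; · simp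
                   · split <;> simp_all

def chead (x : List Char) : List (List Char) → List (List Char)
  | [] => [x]
  | a :: r => (x ++ a) :: r

lemma go_eq_sd : ∀ (fuel : Nat) (l cur : List Char) (acc : List (List Char)),
    l.length ≤ fuel →
    PySem.Chars.splitOn.go ['.'] fuel l cur acc = acc.reverse ++ chead cur.reverse (sd l) := by
  intro fuel
  induction fuel with
  | zero =>
    intro l cur acc h
    have : l = [] := by cases l <;> simp_all
    subst this
    simp [PySem.Chars.splitOn.go, sd, chead]
  | succ n ih =>
    intro l cur acc h
    cases l with
    | nil => simp [PySem.Chars.splitOn.go, sd, chead]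
    | cons c rest =>
      rw [PySem.Chars.splitOn.go]
      by_cases hc : c = '.'
      · subst hc
        have hp : ['.'].isPrefixOf ('.' :: rest) = true := by simp [List.isPrefixOf]
        simp only [hp, if_true, List.length, List.drop]
        rw [ih rest [] (cur.reverse :: acc) (by simpa using h)]
        rcases hr : sd rest with _ | ⟨a, r⟩
        · exact absurd hr (sd_ne_nil rest)
        · simp [sd, hr, chead]
      · have hp : ['.'].isPrefixOf (c :: rest) = false := by
          simp [List.isPrefixOf]; exact fun h' => (hc h'.symm).elim
        simp only [hp, Bool.false_eq_true, if_false]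
        rw [ih rest (c :: cur) acc (by simpa using h)]
        rcases hr : sd rest with _ | ⟨a, r⟩
        · exact absurd hr (sd_ne_nil rest)
        · simp [sd, hr, hc, chead]

lemma splitOn_eq_sd (l : List Char) : PySem.Chars.splitOn l ['.'] = sd l := by
  show PySem.Chars.splitOn.go ['.'] (l.length + 1) l [] [] = sd l
  rw [go_eq_sd (l.length + 1) l [] [] (by omega)]
  rcases hr : sd l with _ | ⟨a, r⟩
  · exact absurd hr (sd_ne_nil l)
  · simp [chead]


lemma sd_append_dot (a t : List Char) (h : '.' ∉ a) :
    sd (a ++ '.' :: t) = a :: sd t := by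
  induction a with
  | nil => simp [sd]
  | cons c rest ih =>
    simp only [List.mem_cons, not_or] at h
    have hc : ¬ c = '.' := fun hc => h.1 hc.symm
    simp only [List.cons_append, sd, if_neg hc, ih h.2]

lemma sd_inv : ∀ (l : List Char) (a : List Char) (r : List (List Char)), sd l = a :: r →
    ('.' ∉ a) ∧ (r = [] → l = a) ∧ (r ≠ [] → ∃ t, l = a ++ '.' :: t ∧ sd t = r) := by
  intro l
  induction l with
  | nil =>
    intro a r h
    rw [sd] at h
    injection h with h1 h2
    subst h1; subst h2
    exact ⟨by simp, fun _ => rfl, fun hr => absurd rfl hr⟩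
  | cons c rest ih =>
    intro a r h
    by_cases hc : c = '.'
    · subst hc
      rw [sd, if_pos rfl] at h
      injection h with h1 h2
      subst h1
      refine ⟨by simp, fun hrn => absurd (hrn ▸ h2) (sd_ne_nil rest), fun _ => ⟨rest, by simp, h2⟩⟩
    · rw [sd, if_neg hc] at h
      rcases hs : sd rest with _ | ⟨b, r2⟩
      · exact absurd hs (sd_ne_nil rest)
      · rw [hs] at h
        simp only at h
        injection h with h1 h2
        subst h1; subst h2
        obtain ⟨hb, he, hne⟩ := ih b r2 hs
        refine ⟨by simp [hb]; exact fun hd => hc hd.symm, fun h0 => by rw [he h0], fun h0 => ?_⟩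
        obtain ⟨t, ht, hst⟩ := hne h0
        exact ⟨t, by simp [ht], hst⟩

lemma prefix_iff_sd (l P X : List Char) (hP : '.' ∉ P) (hX : '.' ∉ X) :
    (P ++ '.' :: (X ++ ['.'])) <+: l ↔ ∃ r, sd l = P :: X :: r ∧ r ≠ [] := by
  constructor
  · rintro ⟨u, hu⟩
    have hl : l = P ++ '.' :: (X ++ '.' :: u) := by simp [← hu]
    rw [hl, sd_append_dot P _ hP, sd_append_dot X u hX]
    exact ⟨sd u, rfl, sd_ne_nil u⟩
  · rintro ⟨r, hr, hne⟩
    obtain ⟨-, -, h2⟩ := sd_inv l P (X :: r) hr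
    obtain ⟨t, ht, hst⟩ := h2 (by simp)
    obtain ⟨-, -, h3⟩ := sd_inv t X r hst
    obtain ⟨t2, ht2, -⟩ := h3 hne
    exact ⟨t2, by simp [ht, ht2]⟩

lemma startswith_pre (L X : List Char) (hX : '.' ∉ X) :
    PySem.Chars.startswith L ("properties".toList ++ '.' :: (X ++ ['.'])) = true ↔
      ∃ r, sd L = "properties".toList :: X :: r ∧ r ≠ [] := by
  rw [PySem.Chars.startswith_iff]
  exact prefix_iff_sd L _ X (by decide) hX

lemma pre1_eq : "properties.AC_Pset_RenovationAndPhasing.".toList =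
    "properties".toList ++ '.' :: ("AC_Pset_RenovationAndPhasing".toList ++ ['.']) := by decide

lemma pre2_eq : "properties.None.".toList =
    "properties".toList ++ '.' :: ("None".toList ++ ['.']) := by decide

lemma char_pred (c : Char) :
    (decide (126 < c.toNat) || decide (c.toNat < 32)) =
      !(decide (32 ≤ c.toNat) && decide (c.toNat ≤ 126)) := by
  by_cases h1 : 126 < c.toNat <;> by_cases h2 : c.toNat < 32 <;>
    (simp [h1, h2]; try omega)

theorem ports_agree (field : String) : is_noisy_change field = is_noisy_change_alt field := by
  unfold is_noisy_change is_noisy_change_alt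
  by_cases hg : field = "geometry.presence"
  · simp [hg]
  · simp only [hg, if_false, noiseFieldPrefixes, List.any_cons, List.any_nil, Bool.or_false]
    rw [splitOn_eq_sd]
    rcases h : sd field.toList with _ | ⟨p0, r0⟩
    · exact absurd h (sd_ne_nil _)
    rcases r0 with _ | ⟨p1, rest⟩
    · -- single segment
      have hs1 : PySem.Chars.startswith field.toList "properties.AC_Pset_RenovationAndPhasing.".toList = false := by
        rw [Bool.eq_false_iff]
        intro hsw
        rw [pre1_eq] at hsw
        obtain ⟨r, hr, -⟩ := (startswith_pre _ _ (by decide)).mp hsw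
        rw [h] at hr; cases hr
      have hs2 : PySem.Chars.startswith field.toList "properties.None.".toList = false := by
        rw [Bool.eq_false_iff]
        intro hsw
        rw [pre2_eq] at hsw
        obtain ⟨r, hr, -⟩ := (startswith_pre _ _ (by decide)).mp hsw
        rw [h] at hr; cases hr
      rw [hs1, hs2]
      simp
    · -- at least two segments
      by_cases hp : p0 = "properties".toList
      · subst hp
        by_cases hn : rest ≠ [] ∧ ("AC_Pset_RenovationAndPhasing".toList = p1 ∨ "None".toList = p1)
        · -- a named-pset prefix matches
          obtain ⟨hrest, hname⟩ := hn
          rcases hname with hname | hname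
          · have hs1 : PySem.Chars.startswith field.toList "properties.AC_Pset_RenovationAndPhasing.".toList = true := by
              rw [pre1_eq, startswith_pre _ _ (by decide)]
              exact ⟨rest, by rw [h, hname], hrest⟩
            rw [hs1]
            simp only [Bool.true_or, if_true]
            simp [hrest]
            exact Or.inl (Or.inl hname.symm)
          · have hs2 : PySem.Chars.startswith field.toList "properties.None.".toList = true := by
              rw [pre2_eq, startswith_pre _ _ (by decide)]
              exact ⟨rest, by rw [h, hname], hrest⟩
            rw [hs2]
            simp only [Bool.or_true, if_true]
            simp [hrest]
            exact Or.inl (Or.inr hname.symm)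
        · -- no named prefix: both fall through to the bad-character scan
          have hs1 : PySem.Chars.startswith field.toList "properties.AC_Pset_RenovationAndPhasing.".toList = false := by
            rw [Bool.eq_false_iff]
            intro hsw
            rw [pre1_eq] at hsw
            obtain ⟨r, hr, hrne⟩ := (startswith_pre _ _ (by decide)).mp hsw
            rw [h] at hr
            injection hr with _ hr2; injection hr2 with hr2a hr2b
            exact hn ⟨hr2b ▸ hrne, Or.inl hr2a.symm⟩
          have hs2 : PySem.Chars.startswith field.toList "properties.None.".toList = false := by
            rw [Bool.eq_false_iff]
            intro hsw
            rw [pre2_eq] at hsw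
            obtain ⟨r, hr, hrne⟩ := (startswith_pre _ _ (by decide)).mp hsw
            rw [h] at hr
            injection hr with _ hr2; injection hr2 with hr2a hr2b
            exact hn ⟨hr2b ▸ hrne, Or.inr hr2a.symm⟩
          rw [hs1, hs2]
          have hn' : ¬ (rest ≠ [] ∧ (p1 = "AC_Pset_RenovationAndPhasing".toList ∨ p1 = "None".toList)) :=
            fun hx => hn ⟨hx.1, hx.2.imp Eq.symm Eq.symm⟩
          simp only [Bool.false_or, if_neg hn']
          have hlen : (2:Nat) ≤ (("properties".toList : List Char) :: p1 :: rest).length := by simp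
          have hc0 : (0:Int) < (rest.length:Int) + 1 + 1 := by omega
          have hc1 : (1:Int) < (rest.length:Int) + 1 + 1 := by omega
          have hget0 : PySem.List.pyGetD (("properties".toList : List Char) :: p1 :: rest) 0 [] = "properties".toList := by
            simp [PySem.List.pyGetD, PySem.List.pyGet?, PySem.List.pyIdx?, hc0]
          have hget1 : PySem.List.pyGetD (("properties".toList : List Char) :: p1 :: rest) 1 [] = p1 := by
            simp [PySem.List.pyGetD, PySem.List.pyGet?, PySem.List.pyIdx?, hc1]
          simp only [hget0, hget1, hlen, and_self, if_pos]
          rw [show (fun (c : Char) => decide (126 < c.toNat) || decide (c.toNat < 32)) = (fun (c : Char) => !(decide (32 ≤ c.toNat) && decide (c.toNat ≤ 126))) from funext char_pred]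
          rw [Bool.eq_iff_iff]
          simp [List.any_eq_true]
      · -- first segment is not "properties"
        have hs1 : PySem.Chars.startswith field.toList "properties.AC_Pset_RenovationAndPhasing.".toList = false := by
          rw [Bool.eq_false_iff]
          intro hsw
          rw [pre1_eq] at hsw
          obtain ⟨r, hr, -⟩ := (startswith_pre _ _ (by decide)).mp hsw
          rw [h] at hr
          injection hr with hr1 _
          exact hp hr1
        have hs2 : PySem.Chars.startswith field.toList "properties.None.".toList = false := by
          rw [Bool.eq_false_iff]
          intro hsw
          rw [pre2_eq] at hsw
          obtain ⟨r, hr, -⟩ := (startswith_pre _ _ (by decide)).mp hsw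
          rw [h] at hr
          injection hr with hr1 _
          exact hp hr1
        have hc0 : (0:Int) < (rest.length:Int) + 1 + 1 := by omega
        have hget0 : PySem.List.pyGetD (p0 :: p1 :: rest) 0 [] = p0 := by
          simp [PySem.List.pyGetD, PySem.List.pyGet?, PySem.List.pyIdx?, hc0]
        have hpd : (decide (p0 = ['p','r','o','p','e','r','t','i','e','s']) : Bool) = false := by
          simp only [decide_eq_false_iff_not]
          exact fun hq => hp (hq.trans (by rfl))
        rw [hs1, hs2]
        simp [hget0, hpd]

-- ===== VERDICT (by name: the statement is the Claim_ definition above) =====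
theorem is_noisy_change_spec : Claim_equal_is_noisy_change := by
  intro field _
  exact ports_agree field
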